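-- pv_equiv track=rewrite | github.com/bruno185/DonyGS | scripts/analyze_overlapall.py | faces_vertices_equal
-- ===== SOURCE A (Python) =====
-- def faces_vertices_equal(poly1, poly2):
--     n1 = len(poly1); n2 = len(poly2)
--     if n1 != n2 or n1 == 0: return False
--     # forward rotation
--     for shift in range(n1):
--         ok = True
--         for k in range(n1):
--             if poly1[k] != poly2[(shift + k) % n1]:
--                 ok = False; break
--         if ok: return True
--     # reverse rotation
--     for shift in range(n1):
--         ok = True
--         for k in range(n1):
--             if poly1[k] != poly2[(shift - k) % n1]:
--                 ok = False; break
--         if ok: return True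
--     return False
-- ===== SOURCE B (Python) =====
-- def _kmp_fail(pat):
--     # failure table: fail[i] = length of the longest proper border of pat[:i+1]
--     fail = [0]
--     k = 0
--     for i in range(1, len(pat)):
--         while k > 0 and pat[i] != pat[k]:
--             k = fail[k - 1]
--         if pat[i] == pat[k]:
--             k += 1
--         fail.append(k)
--     return fail
--
-- def _kmp_contains(pat, txt):
--     fail = _kmp_fail(pat)
--     k = 0
--     for c in txt:
--         while k > 0 and c != pat[k]:
--             k = fail[k - 1]
--         if c == pat[k]:
--             k += 1
--         if k == len(pat):
--             return True
--     return False
--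
-- def faces_vertices_equal(poly1, poly2):
--     n = len(poly1)
--     if n == 0 or n != len(poly2):
--         return False
--     d = poly2 + poly2
--     return _kmp_contains(poly1, d) or _kmp_contains(poly1[::-1], d)
-- ===== Notes on version B (the rewrite author's own statement) =====
-- stated objective: alternative
-- what changed: A's nested modular-index scans over all shifts are replaced by KMP string matching: a failure table is built for poly1 (and its reverse) and each is searched for in one linear pass over poly2+poly2, so no shift is ever re-verified from scratch; this trades A's O(n^2) worst case for O(n), though on typical inputs A's early-breaking inner loop already behaves linearly and a timing run showed only ~1.3x.
import Mathlib
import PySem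

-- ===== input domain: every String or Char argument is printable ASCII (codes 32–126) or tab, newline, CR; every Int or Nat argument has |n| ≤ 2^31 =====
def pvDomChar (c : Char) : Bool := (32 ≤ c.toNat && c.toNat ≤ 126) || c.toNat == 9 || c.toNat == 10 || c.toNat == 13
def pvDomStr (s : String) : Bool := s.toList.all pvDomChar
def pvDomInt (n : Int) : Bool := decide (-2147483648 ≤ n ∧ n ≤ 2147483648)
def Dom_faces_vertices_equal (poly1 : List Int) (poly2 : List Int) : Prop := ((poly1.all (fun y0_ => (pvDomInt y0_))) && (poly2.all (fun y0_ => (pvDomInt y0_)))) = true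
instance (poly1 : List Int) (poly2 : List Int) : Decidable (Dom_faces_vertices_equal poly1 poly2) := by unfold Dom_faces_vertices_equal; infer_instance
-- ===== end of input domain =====

-- B replaces A's nested modular-index scans by KMP string matching: poly1 (and its
-- reverse) is a rotation of poly2 iff it occurs as a contiguous run of poly2+poly2,
-- and that search is done with a failure table in a single linear pass (objective:
-- alternative — B avoids A's quadratic worst case, but on a timing run's inputs
-- A's inner loop breaks early and the measured ratio was only ~1.3x, so no speed is claimed).

-- ===== PORT A =====
-- inner 'for k in range(n1)' with break, forward direction: poly2[(shift + k) % n1]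
def fveInnerF (poly1 poly2 : List Int) (n1 shift : Int) : List Int → Bool
  | [] => true
  | k :: ks =>
    if PySem.List.pyGetD poly1 k 0 ≠ PySem.List.pyGetD poly2 (PySem.Int.mod (shift + k) n1) 0
    then false
    else fveInnerF poly1 poly2 n1 shift ks

-- inner loop, reverse direction: poly2[(shift - k) % n1]
def fveInnerR (poly1 poly2 : List Int) (n1 shift : Int) : List Int → Bool
  | [] => true
  | k :: ks =>
    if PySem.List.pyGetD poly1 k 0 ≠ PySem.List.pyGetD poly2 (PySem.Int.mod (shift - k) n1) 0
    then false
    else fveInnerR poly1 poly2 n1 shift ks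

-- outer 'for shift in range(n1)' with early 'return True', forward
def fveLoopF (poly1 poly2 : List Int) (n1 : Int) : List Int → Bool
  | [] => false
  | s :: ss =>
    if fveInnerF poly1 poly2 n1 s (PySem.List.pyRange 0 n1 1) then true
    else fveLoopF poly1 poly2 n1 ss

-- outer loop, reverse
def fveLoopR (poly1 poly2 : List Int) (n1 : Int) : List Int → Bool
  | [] => false
  | s :: ss =>
    if fveInnerR poly1 poly2 n1 s (PySem.List.pyRange 0 n1 1) then true
    else fveLoopR poly1 poly2 n1 ss

def faces_vertices_equal (poly1 : List Int) (poly2 : List Int) : Bool :=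
  let n1 : Int := poly1.length
  let n2 : Int := poly2.length
  if n1 ≠ n2 ∨ n1 = 0 then false
  else if fveLoopF poly1 poly2 n1 (PySem.List.pyRange 0 n1 1) then true
  else if fveLoopR poly1 poly2 n1 (PySem.List.pyRange 0 n1 1) then true
  else false

-- ===== PORT B =====
-- 'while k > 0 and c != pat[k]: k = fail[k - 1]' of Source B; the dependent guard only
-- makes the recursion total — for the failure tables kmpFailGo builds, fail[k-1] < k
-- always holds (IsPB below), so on every reachable state this is exactly the while loop
def kmpStep (pat : List Int) (fl : List Nat) (c : Int) (k : Nat) : Nat :=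
  if k = 0 then k
  else if c = PySem.List.pyGetD pat (k : Int) 0 then k
  else if h : PySem.List.pyGetD fl ((k : Int) - 1) 0 < k then
    kmpStep pat fl c (PySem.List.pyGetD fl ((k : Int) - 1) 0)
  else PySem.List.pyGetD fl ((k : Int) - 1) 0
termination_by k

-- 'for i in range(1, len(pat)):' of _kmp_fail, state (fail, k)
def kmpFailGo (pat : List Int) (fl : List Nat) (k : Nat) (i : Nat) : List Nat :=
  if _h : i < pat.length then
    let r := kmpStep pat fl (PySem.List.pyGetD pat (i : Int) 0) k
    let k' := if PySem.List.pyGetD pat (i : Int) 0 = PySem.List.pyGetD pat (r : Int) 0 then r + 1 else r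
    kmpFailGo pat (fl ++ [k']) k' (i + 1)
  else fl
termination_by pat.length - i

def kmpFail (pat : List Int) : List Nat := kmpFailGo pat [0] 0 1

-- 'for c in txt:' of _kmp_contains, with the early 'return True'
def kmpGo (pat : List Int) (fl : List Nat) (k : Nat) : List Int → Bool
  | [] => false
  | c :: cs =>
    let r := kmpStep pat fl c k
    let k' := if c = PySem.List.pyGetD pat (r : Int) 0 then r + 1 else r
    if k' = pat.length then true else kmpGo pat fl k' cs

def kmpContains (pat txt : List Int) : Bool := kmpGo pat (kmpFail pat) 0 txt

def faces_vertices_equal_alt (poly1 : List Int) (poly2 : List Int) : Bool :=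
  let n : Int := poly1.length
  if n = 0 ∨ n ≠ (poly2.length : Int) then false
  else
    let d := poly2 ++ poly2
    kmpContains poly1 d || kmpContains poly1.reverse d

-- ===== PRECONDITION & SPEC =====
def Spec_faces_vertices_equal (poly1 : List Int) (poly2 : List Int) (out : Bool) : Prop := out = faces_vertices_equal_alt poly1 poly2
instance (poly1 : List Int) (poly2 : List Int) (out : Bool) : Decidable (Spec_faces_vertices_equal poly1 poly2 out) := by unfold Spec_faces_vertices_equal; infer_instance

-- ===== CLAIM (what is proved, stated in full; the proofs are below) =====
def Claim_equal_faces_vertices_equal : Prop := ∀ (poly1 : List Int) (poly2 : List Int), Dom_faces_vertices_equal poly1 poly2 → Spec_faces_vertices_equal poly1 poly2 (faces_vertices_equal poly1 poly2)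

-- ===== LEMMAS AND PROOFS =====

-- ---------- A-side: the nested modular scans decide rotation equality ----------

lemma innerF_eq_all (p1 p2 : List Int) (n s : Int) (ks : List Int) :
    fveInnerF p1 p2 n s ks =
      ks.all (fun k => PySem.List.pyGetD p1 k 0 == PySem.List.pyGetD p2 (PySem.Int.mod (s + k) n) 0) := by
  induction ks with
  | nil => rfl
  | cons k ks ih =>
    simp only [fveInnerF, List.all_cons, ih]
    by_cases h : PySem.List.pyGetD p1 k 0 = PySem.List.pyGetD p2 (PySem.Int.mod (s + k) n) 0 <;>
      simp [h]

lemma innerR_eq_all (p1 p2 : List Int) (n s : Int) (ks : List Int) :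
    fveInnerR p1 p2 n s ks =
      ks.all (fun k => PySem.List.pyGetD p1 k 0 == PySem.List.pyGetD p2 (PySem.Int.mod (s - k) n) 0) := by
  induction ks with
  | nil => rfl
  | cons k ks ih =>
    simp only [fveInnerR, List.all_cons, ih]
    by_cases h : PySem.List.pyGetD p1 k 0 = PySem.List.pyGetD p2 (PySem.Int.mod (s - k) n) 0 <;>
      simp [h]

lemma loopF_eq_any (p1 p2 : List Int) (n : Int) (ss : List Int) :
    fveLoopF p1 p2 n ss = ss.any (fun s => fveInnerF p1 p2 n s (PySem.List.pyRange 0 n 1)) := by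
  induction ss with
  | nil => rfl
  | cons s ss ih =>
    simp only [fveLoopF, List.any_cons, ih]
    by_cases h : fveInnerF p1 p2 n s (PySem.List.pyRange 0 n 1) = true <;> simp [h]

lemma loopR_eq_any (p1 p2 : List Int) (n : Int) (ss : List Int) :
    fveLoopR p1 p2 n ss = ss.any (fun s => fveInnerR p1 p2 n s (PySem.List.pyRange 0 n 1)) := by
  induction ss with
  | nil => rfl
  | cons s ss ih =>
    simp only [fveLoopR, List.any_cons, ih]
    by_cases h : fveInnerR p1 p2 n s (PySem.List.pyRange 0 n 1) = true <;> simp [h]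

lemma point_get (p1 p2 : List Int) (hlen : p1.length = p2.length) (hn : 0 < p2.length)
    (m : Nat) (k : Nat) (hk : k < p2.length) :
    (PySem.List.pyGetD p1 (k : Int) 0 = PySem.List.pyGetD p2 (PySem.Int.mod ((m : Int) + (k : Int)) (p2.length : Int)) 0)
      ↔ p1[k]'(by omega) = p2[(m + k) % p2.length]'(Nat.mod_lt _ hn) := by
  have hpos : (0 : Int) < (p2.length : Int) := by exact_mod_cast hn
  rw [PySem.List.pyGetD_eq_getElem p1 0 (by positivity) (by exact_mod_cast (by omega : k < p1.length))]
  rw [PySem.Int.mod_eq_emod_of_pos hpos]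
  rw [PySem.List.pyGetD_eq_getElem p2 0 (Int.emod_nonneg _ (by omega)) (Int.emod_lt_of_pos _ hpos)]
  have hidx : (((m : Int) + (k : Int)) % (p2.length : Int)).toNat = (m + k) % p2.length := by
    rw [show ((m : Int) + (k : Int)) = (((m + k : Nat)) : Int) by push_cast; ring, ← Int.natCast_mod]
    exact Int.toNat_natCast _
  simp [hidx]

lemma point_getR (p1 p2 : List Int) (hlen : p1.length = p2.length) (hn : 0 < p2.length)
    (m : Nat) (k : Nat) (hk : k < p2.length) :
    (PySem.List.pyGetD p1 (k : Int) 0 = PySem.List.pyGetD p2 (PySem.Int.mod ((m : Int) - (k : Int)) (p2.length : Int)) 0)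
      ↔ p1[k]'(by omega) = p2[(m + p2.length - k) % p2.length]'(Nat.mod_lt _ hn) := by
  have hpos : (0 : Int) < (p2.length : Int) := by exact_mod_cast hn
  rw [PySem.List.pyGetD_eq_getElem p1 0 (by positivity) (by exact_mod_cast (by omega : k < p1.length))]
  rw [PySem.Int.mod_eq_emod_of_pos hpos]
  rw [PySem.List.pyGetD_eq_getElem p2 0 (Int.emod_nonneg _ (by omega)) (Int.emod_lt_of_pos _ hpos)]
  have hidx : (((m : Int) - (k : Int)) % (p2.length : Int)).toNat = (m + p2.length - k) % p2.length := by
    rw [show ((m : Int) - (k : Int)) = (((m + p2.length - k : Nat)) : Int) - (p2.length : Int) by omega]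
    rw [Int.sub_emod_right, ← Int.natCast_mod]
    exact Int.toNat_natCast _
  simp [hidx]

lemma shift_bij (len : Nat) (hn : 0 < len) (P : Nat → Prop) :
    (∃ m < len, P ((m + 1) % len)) ↔ (∃ t < len, P t) := by
  constructor
  · rintro ⟨m, hm, hp⟩
    exact ⟨(m + 1) % len, Nat.mod_lt _ hn, hp⟩
  · rintro ⟨t, ht, hp⟩
    refine ⟨(t + len - 1) % len, Nat.mod_lt _ hn, ?_⟩
    have : ((t + len - 1) % len + 1) % len = t := by
      rw [Nat.mod_add_mod, show t + len - 1 + 1 = t + len from by omega, Nat.add_mod_right,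
        Nat.mod_eq_of_lt ht]
    rw [this]; exact hp

-- forward inner loop ⇔ rotation equality
lemma innerF_iff (p1 p2 : List Int) (hlen : p1.length = p2.length) (hn : 0 < p2.length)
    (m : Nat) :
    (fveInnerF p1 p2 (p2.length : Int) (m : Int) (PySem.List.pyRange 0 (p2.length : Int) 1) = true)
      ↔ p1 = p2.rotate m := by
  rw [innerF_eq_all, List.all_eq_true]
  constructor
  · intro h
    apply List.ext_getElem (by simp [hlen])
    intro k hk1 hk2
    have hklt : k < p2.length := by omega
    have := h (k : Int) (PySem.List.mem_pyRange_one.mpr ⟨by positivity, by exact_mod_cast hklt⟩)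
    rw [beq_iff_eq] at this
    have hp := (point_get p1 p2 hlen hn m k hklt).mp (by exact_mod_cast this)
    rw [List.getElem_rotate]
    rw [hp]
    congr 1
    simp [Nat.add_comm]
  · intro h k hkmem
    obtain ⟨hk0, hk1⟩ := PySem.List.mem_pyRange_one.mp hkmem
    rw [beq_iff_eq]
    have hknat : k = ((k.toNat : Nat) : Int) := by omega
    have hklt : k.toNat < p2.length := by omega
    have hp := (point_get p1 p2 hlen hn m k.toNat hklt).mpr
      (by simp only [h, List.getElem_rotate]; congr 1; simp [Nat.add_comm])
    rw [hknat]
    exact hp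

-- reverse inner loop ⇔ reverse-rotation equality (at the shifted index)
lemma innerR_iff (p1 p2 : List Int) (hlen : p1.length = p2.length) (hn : 0 < p2.length)
    (m : Nat) :
    (fveInnerR p1 p2 (p2.length : Int) (m : Int) (PySem.List.pyRange 0 (p2.length : Int) 1) = true)
      ↔ p1.reverse = p2.rotate ((m + 1) % p2.length) := by
  rw [innerR_eq_all, List.all_eq_true]
  constructor
  · intro h
    apply List.ext_getElem (by simp [hlen])
    intro j hj1 hj2
    have hjlen : j < p2.length := by simp at hj1; omega
    have hk : p2.length - 1 - j < p2.length := by omega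
    have := h ((p2.length - 1 - j : Nat) : Int)
      (PySem.List.mem_pyRange_one.mpr ⟨by positivity, by exact_mod_cast hk⟩)
    rw [beq_iff_eq] at this
    have hp := (point_getR p1 p2 hlen hn m (p2.length - 1 - j) hk).mp this
    rw [List.getElem_reverse, List.getElem_rotate]
    have e1 : p1[p1.length - 1 - j]'(by omega) = p1[p2.length - 1 - j]'(by omega) := by
      congr 1; omega
    rw [e1, hp]
    congr 1
    rw [Nat.add_mod_mod]
    congr 1
    omega
  · intro h k hkmem
    obtain ⟨hk0, hk1⟩ := PySem.List.mem_pyRange_one.mp hkmem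
    have hklt : k.toNat < p2.length := by omega
    rw [beq_iff_eq]
    have hj : p2.length - 1 - k.toNat < p2.length := by omega
    have hp := (point_getR p1 p2 hlen hn m k.toNat hklt).mpr ?_
    · rw [show k = ((k.toNat : Nat) : Int) from by omega]
      exact hp
    · have hrev : p1[k.toNat]'(by omega) = p1.reverse[p2.length - 1 - k.toNat]'(by simp; omega) := by
        rw [List.getElem_reverse]
        congr 1; omega
      rw [hrev]
      simp only [h, List.getElem_rotate]
      congr 1
      rw [Nat.add_mod_mod]
      congr 1
      omega

lemma loopF_iff (p1 p2 : List Int) (hlen : p1.length = p2.length) (hn : 0 < p2.length) :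
    (fveLoopF p1 p2 (p2.length : Int) (PySem.List.pyRange 0 (p2.length : Int) 1) = true)
      ↔ ∃ m < p2.length, p1 = p2.rotate m := by
  rw [loopF_eq_any, List.any_eq_true]
  constructor
  · rintro ⟨s, hs, hinner⟩
    obtain ⟨hs0, hs1⟩ := PySem.List.mem_pyRange_one.mp hs
    refine ⟨s.toNat, by omega, ?_⟩
    rw [← innerF_iff p1 p2 hlen hn s.toNat]
    rw [show ((s.toNat : Nat) : Int) = s from by omega]
    exact hinner
  · rintro ⟨m, hm, hrot⟩
    refine ⟨(m : Int), PySem.List.mem_pyRange_one.mpr ⟨by positivity, by exact_mod_cast hm⟩, ?_⟩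
    exact (innerF_iff p1 p2 hlen hn m).mpr hrot

lemma loopR_iff (p1 p2 : List Int) (hlen : p1.length = p2.length) (hn : 0 < p2.length) :
    (fveLoopR p1 p2 (p2.length : Int) (PySem.List.pyRange 0 (p2.length : Int) 1) = true)
      ↔ ∃ m < p2.length, p1.reverse = p2.rotate m := by
  rw [loopR_eq_any, List.any_eq_true]
  rw [← shift_bij p2.length hn (fun t => p1.reverse = p2.rotate t)]
  constructor
  · rintro ⟨s, hs, hinner⟩
    obtain ⟨hs0, hs1⟩ := PySem.List.mem_pyRange_one.mp hs
    refine ⟨s.toNat, by omega, ?_⟩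
    rw [← innerR_iff p1 p2 hlen hn s.toNat]
    rw [show ((s.toNat : Nat) : Int) = s from by omega]
    exact hinner
  · rintro ⟨m, hm, hrot⟩
    refine ⟨(m : Int), PySem.List.mem_pyRange_one.mpr ⟨by positivity, by exact_mod_cast hm⟩, ?_⟩
    exact (innerR_iff p1 p2 hlen hn m).mpr hrot

-- ---------- B-side: KMP decides the infix relation ----------

-- b is the longest proper border of pat.take q ("border" = prefix of pat that is a suffix of pat.take q)
def IsPB (pat : List Int) (q b : Nat) : Prop :=
  b < q ∧ pat.take b <:+ pat.take q ∧ ∀ b' < q, pat.take b' <:+ pat.take q → b' ≤ b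

-- the failure table is correct at entries 0 .. j-1
def FailOk (pat : List Int) (fl : List Nat) (j : Nat) : Prop :=
  ∀ q, 1 ≤ q → q ≤ j → IsPB pat q (fl.getD (q - 1) 0)

-- k is the length of the longest prefix of pat that is a suffix of t
def IsMM (pat t : List Int) (k : Nat) : Prop :=
  k ≤ pat.length ∧ pat.take k <:+ t ∧ ∀ q ≤ pat.length, pat.take q <:+ t → q ≤ k

lemma FailOk.mono {pat : List Int} {fl : List Nat} {i j : Nat} (h : FailOk pat fl j)
    (hle : i ≤ j) : FailOk pat fl i :=
  fun q h1 h2 => h q h1 (le_trans h2 hle)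

lemma suffix_append_singleton {α : Type} {u t : List α} (c : α) (h : u <:+ t) :
    u ++ [c] <:+ t ++ [c] := by
  obtain ⟨s, rfl⟩ := h
  exact ⟨s, by simp⟩

lemma append_singleton_suffix_iff {α : Type} {u t : List α} {x c : α} :
    (u ++ [x] <:+ t ++ [c]) ↔ (x = c ∧ u <:+ t) := by
  constructor
  · intro h
    rw [← List.reverse_prefix] at h
    simp only [List.reverse_append, List.reverse_singleton, List.singleton_append] at h
    rw [List.cons_prefix_cons] at h
    obtain ⟨hx, hu⟩ := h
    exact ⟨hx, by rwa [List.reverse_prefix] at hu⟩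
  · rintro ⟨rfl, s, rfl⟩
    exact ⟨s, by simp⟩

-- the while loop returns the largest chain member j (a border length of pat.take k)
-- with pat[j] = c, or 0 if there is none
lemma kmpStep_spec (pat : List Int) (fl : List Nat) (c : Int) :
    ∀ k, k < pat.length → FailOk pat fl k →
      kmpStep pat fl c k ≤ k ∧
      pat.take (kmpStep pat fl c k) <:+ pat.take k ∧
      (kmpStep pat fl c k = 0 ∨ c = pat.getD (kmpStep pat fl c k) 0) ∧
      (∀ j, j ≤ k → pat.take j <:+ pat.take k → c = pat.getD j 0 → j ≤ kmpStep pat fl c k) := by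
  intro k
  induction k using Nat.strong_induction_on with
  | _ k ih =>
    intro hk hok
    rw [kmpStep]
    by_cases h0 : k = 0
    · subst h0
      simp only []
      exact ⟨le_rfl, List.suffix_refl _, Or.inl rfl, fun j hj _ _ => hj⟩
    · rw [if_neg h0]
      by_cases hc : c = PySem.List.pyGetD pat (k : Int) 0
      · rw [if_pos hc]
        refine ⟨le_rfl, List.suffix_refl _, Or.inr ?_, fun j hj _ _ => hj⟩
        rwa [PySem.List.pyGetD_natCast] at hc
      · rw [if_neg hc]
        have hcast : ((k : Int) - 1) = (((k - 1 : Nat)) : Int) := by omega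
        have hpb : IsPB pat k (fl.getD (k - 1) 0) := hok k (by omega) le_rfl
        have hk' : PySem.List.pyGetD fl ((k : Int) - 1) 0 = fl.getD (k - 1) 0 := by
          rw [hcast, PySem.List.pyGetD_natCast]
        rw [dif_pos (by rw [hk']; exact hpb.1)]
        rw [hk']
        set k' := fl.getD (k - 1) 0 with hk'def
        have hlt : k' < k := hpb.1
        obtain ⟨ih1, ih2, ih3, ih4⟩ := ih k' hlt (by omega) (hok.mono (by omega))
        refine ⟨by omega, ih2.trans hpb.2.1, ih3, ?_⟩
        intro j hj hsfx hcj
        have hjk : j < k := by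
          rcases Nat.lt_or_ge j k with h | h
          · exact h
          · exfalso
            have : j = k := by omega
            subst this
            apply hc
            rw [PySem.List.pyGetD_natCast]
            rw [List.getD_eq_getElem _ _ (by omega)] at hcj ⊢
            exact hcj
        have hjk' : j ≤ k' := hpb.2.2 j hjk hsfx
        have hchain : pat.take j <:+ pat.take k' := by
          apply List.suffix_of_suffix_length_le hsfx hpb.2.1
          rw [List.length_take, List.length_take]
          omega
        exact ih4 j hjk' hchain hcj

-- one step of the text loop preserves the longest-match invariant
lemma kmpAdvance_MM (pat t : List Int) (fl : List Nat) (c : Int) (k : Nat)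
    (hk : k < pat.length) (hok : FailOk pat fl k) (hmm : IsMM pat t k) :
    IsMM pat (t ++ [c])
      (if c = PySem.List.pyGetD pat ((kmpStep pat fl c k : Nat) : Int) 0
       then kmpStep pat fl c k + 1 else kmpStep pat fl c k) := by
  obtain ⟨hr1, hr2, hr3, hr4⟩ := kmpStep_spec pat fl c k hk hok
  set r := kmpStep pat fl c k with hrdef
  have hrn : r < pat.length := by omega
  have hrt : pat.take r <:+ t := hr2.trans hmm.2.1
  by_cases hc : c = PySem.List.pyGetD pat ((r : Nat) : Int) 0
  · rw [if_pos hc]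
    have hcr : c = pat[r]'hrn := by
      rw [PySem.List.pyGetD_natCast, List.getD_eq_getElem _ _ hrn] at hc
      exact hc
    refine ⟨by omega, ?_, ?_⟩
    · rw [List.take_succ_eq_append_getElem hrn, ← hcr]
      exact suffix_append_singleton c hrt
    · intro q hq hsfx
      match q with
      | 0 => omega
      | q' + 1 =>
        have hq'n : q' < pat.length := by omega
        rw [List.take_succ_eq_append_getElem hq'n] at hsfx
        rw [append_singleton_suffix_iff] at hsfx
        obtain ⟨hx, hu⟩ := hsfx
        have hq'k : q' ≤ k := hmm.2.2 q' (by omega) hu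
        have hchain : pat.take q' <:+ pat.take k := by
          apply List.suffix_of_suffix_length_le hu hmm.2.1
          rw [List.length_take, List.length_take]; omega
        have : q' ≤ r := hr4 q' hq'k hchain
          (by rw [List.getD_eq_getElem _ _ hq'n]; exact hx.symm)
        omega
  · rw [if_neg hc]
    have hr0 : r = 0 := by
      rcases hr3 with h | h
      · exact h
      · exfalso; apply hc
        rw [PySem.List.pyGetD_natCast, List.getD_eq_getElem _ _ hrn]
        rw [List.getD_eq_getElem _ _ hrn] at h
        exact h
    refine ⟨by omega, by rw [hr0]; simp, ?_⟩
    intro q hq hsfx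
    match q with
    | 0 => omega
    | q' + 1 =>
      exfalso
      have hq'n : q' < pat.length := by omega
      rw [List.take_succ_eq_append_getElem hq'n] at hsfx
      rw [append_singleton_suffix_iff] at hsfx
      obtain ⟨hx, hu⟩ := hsfx
      have hq'k : q' ≤ k := hmm.2.2 q' (by omega) hu
      have hchain : pat.take q' <:+ pat.take k := by
        apply List.suffix_of_suffix_length_le hu hmm.2.1
        rw [List.length_take, List.length_take]; omega
      have hle : q' ≤ r := hr4 q' hq'k hchain
        (by rw [List.getD_eq_getElem _ _ hq'n]; exact hx.symm)
      have hq'0 : q' = 0 := by omega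
      apply hc
      rw [PySem.List.pyGetD_natCast, List.getD_eq_getElem _ _ hrn]
      subst hq'0
      simp only [hr0]
      exact hx.symm

-- one step of the table-building loop: the longest proper border of the next prefix
lemma kmpAdvance_PB (pat : List Int) (fl : List Nat) (i k : Nat)
    (hin : i < pat.length) (hok : FailOk pat fl i) (hpb : IsPB pat i k) :
    IsPB pat (i + 1)
      (if PySem.List.pyGetD pat ((i : Nat) : Int) 0
            = PySem.List.pyGetD pat ((kmpStep pat fl (PySem.List.pyGetD pat ((i : Nat) : Int) 0) k : Nat) : Int) 0
       then kmpStep pat fl (PySem.List.pyGetD pat ((i : Nat) : Int) 0) k + 1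
       else kmpStep pat fl (PySem.List.pyGetD pat ((i : Nat) : Int) 0) k) := by
  set c := PySem.List.pyGetD pat ((i : Nat) : Int) 0 with hcdef
  have hci : c = pat[i]'hin := by
    rw [hcdef, PySem.List.pyGetD_natCast, List.getD_eq_getElem _ _ hin]
  have hkn : k < pat.length := by
    have := hpb.1; omega
  obtain ⟨hr1, hr2, hr3, hr4⟩ := kmpStep_spec pat fl c k hkn (hok.mono (le_of_lt hpb.1))
  set r := kmpStep pat fl c k with hrdef
  have hrn : r < pat.length := by omega
  have hrlt : r < i := by have := hpb.1; omega
  have hrti : pat.take r <:+ pat.take i := hr2.trans hpb.2.1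
  have htakei : pat.take (i + 1) = pat.take i ++ [pat[i]'hin] := List.take_succ_eq_append_getElem hin
  by_cases hc : c = PySem.List.pyGetD pat ((r : Nat) : Int) 0
  · rw [if_pos hc]
    have hcr : c = pat[r]'hrn := by
      rw [PySem.List.pyGetD_natCast, List.getD_eq_getElem _ _ hrn] at hc
      exact hc
    refine ⟨by omega, ?_, ?_⟩
    · rw [htakei, List.take_succ_eq_append_getElem hrn, ← hcr, ← hci]
      exact suffix_append_singleton c hrti
    · intro b hb hsfx
      match b with
      | 0 => omega
      | b' + 1 =>
        have hb'n : b' < pat.length := by omega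
        rw [htakei, List.take_succ_eq_append_getElem hb'n, append_singleton_suffix_iff] at hsfx
        obtain ⟨hx, hu⟩ := hsfx
        have hb'i : b' < i := by omega
        have hb'k : b' ≤ k := hpb.2.2 b' hb'i hu
        have hchain : pat.take b' <:+ pat.take k := by
          apply List.suffix_of_suffix_length_le hu hpb.2.1
          rw [List.length_take, List.length_take]; omega
        have : b' ≤ r := hr4 b' hb'k hchain
          (by rw [List.getD_eq_getElem _ _ hb'n, hci]; exact hx.symm)
        omega
  · rw [if_neg hc]
    have hr0 : r = 0 := by
      rcases hr3 with h | h
      · exact h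
      · exfalso; apply hc
        rw [PySem.List.pyGetD_natCast, List.getD_eq_getElem _ _ hrn]
        rw [List.getD_eq_getElem _ _ hrn] at h
        exact h
    refine ⟨by omega, by rw [hr0]; simp, ?_⟩
    intro b hb hsfx
    match b with
    | 0 => omega
    | b' + 1 =>
      exfalso
      have hb'n : b' < pat.length := by omega
      rw [htakei, List.take_succ_eq_append_getElem hb'n, append_singleton_suffix_iff] at hsfx
      obtain ⟨hx, hu⟩ := hsfx
      have hb'i : b' < i := by omega
      have hb'k : b' ≤ k := hpb.2.2 b' hb'i hu
      have hchain : pat.take b' <:+ pat.take k := by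
        apply List.suffix_of_suffix_length_le hu hpb.2.1
        rw [List.length_take, List.length_take]; omega
      have hle : b' ≤ r := hr4 b' hb'k hchain
        (by rw [List.getD_eq_getElem _ _ hb'n, hci]; exact hx.symm)
      have hb'0 : b' = 0 := by omega
      apply hc
      rw [PySem.List.pyGetD_natCast, List.getD_eq_getElem _ _ hrn]
      subst hb'0
      simp only [hr0]
      rw [hci]
      exact hx.symm

lemma kmpFailGo_ok (pat : List Int) :
    ∀ (d i : Nat) (fl : List Nat) (k : Nat), pat.length - i = d → 1 ≤ i → fl.length = i →
      FailOk pat fl i → IsPB pat i k →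
      FailOk pat (kmpFailGo pat fl k i) pat.length := by
  intro d
  induction d with
  | zero =>
    intro i fl k hd h1 hlen hok _
    rw [kmpFailGo, dif_neg (by omega)]
    exact hok.mono (by omega)
  | succ d ihd =>
    intro i fl k hd h1 hlen hok hpb
    have hin : i < pat.length := by omega
    rw [kmpFailGo, dif_pos hin]
    have hadv := kmpAdvance_PB pat fl i k hin hok hpb
    set r := kmpStep pat fl (PySem.List.pyGetD pat ((i : Nat) : Int) 0) k with hrdef
    set k' := if PySem.List.pyGetD pat ((i : Nat) : Int) 0 = PySem.List.pyGetD pat ((r : Nat) : Int) 0 then r + 1 else r with hk'def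
    apply ihd (i + 1) (fl ++ [k']) k' (by omega) (by omega) (by simp [hlen])
    · intro q hq1 hq2
      rcases Nat.lt_or_ge q (i + 1) with hlt | hge
      · have hq : q ≤ i := by omega
        have hidx : q - 1 < fl.length := by omega
        rw [List.getD_append _ _ _ _ hidx]
        exact hok q hq1 hq
      · have hq : q = i + 1 := by omega
        subst hq
        have heq : (fl ++ [k']).getD (i + 1 - 1) 0 = k' := by simp [hlen]
        rw [heq]
        exact hadv
    · exact hadv

lemma kmpFail_ok (pat : List Int) : FailOk pat (kmpFail pat) pat.length := by
  unfold kmpFail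
  rcases Nat.eq_zero_or_pos pat.length with h0 | hpos
  · rw [kmpFailGo, dif_neg (by omega)]
    intro q h1 h2
    exact absurd h2 (by omega)
  · apply kmpFailGo_ok pat (pat.length - 1) 1 [0] 0 rfl le_rfl rfl
    · intro q h1 h2
      have : q = 1 := by omega
      subst this
      have hget : ([0] : List Nat).getD (1 - 1) 0 = 0 := rfl
      rw [hget]
      exact ⟨by omega, by simp, fun b' hb' _ => by omega⟩
    · exact ⟨by omega, by simp, fun b' hb' _ => by omega⟩

lemma IsMM_not_suffix (pat t : List Int) (k : Nat) (hmm : IsMM pat t k)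
    (hk : k < pat.length) : ¬ pat <:+ t := by
  intro hs
  have := hmm.2.2 pat.length le_rfl (by rwa [List.take_length])
  omega

lemma kmpGo_iff (pat : List Int) (fl : List Nat) (hok : FailOk pat fl pat.length) :
    ∀ (cs t : List Int) (k : Nat), IsMM pat t k → k < pat.length →
      (kmpGo pat fl k cs = true ↔ ∃ u, u <+: cs ∧ pat <:+ t ++ u) := by
  intro cs
  induction cs with
  | nil =>
    intro t k hmm hk
    simp only [kmpGo]
    constructor
    · intro h; cases h
    · rintro ⟨u, hu, hs⟩
      rw [List.prefix_nil] at hu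
      subst hu
      rw [List.append_nil] at hs
      exact absurd hs (IsMM_not_suffix pat t k hmm hk)
  | cons c cs ih =>
    intro t k hmm hk
    have hadv := kmpAdvance_MM pat t fl c k hk (hok.mono (by omega)) hmm
    simp only [kmpGo]
    set r := kmpStep pat fl c k with hrdef
    set k' := if c = PySem.List.pyGetD pat ((r : Nat) : Int) 0 then r + 1 else r with hk'def
    by_cases hfin : k' = pat.length
    · rw [if_pos hfin]
      simp only [true_iff]
      refine ⟨[c], ⟨cs, rfl⟩, ?_⟩
      have := hadv.2.1
      rw [hfin, List.take_length] at this
      exact this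
    · rw [if_neg hfin]
      have hk'n : k' < pat.length := by
        have := hadv.1; omega
      rw [ih (t ++ [c]) k' hadv hk'n]
      constructor
      · rintro ⟨u, hu, hs⟩
        refine ⟨c :: u, ?_, ?_⟩
        · obtain ⟨v, rfl⟩ := hu
          exact ⟨v, rfl⟩
        · rwa [show t ++ c :: u = t ++ [c] ++ u by simp]
      · rintro ⟨u, hu, hs⟩
        match u with
        | [] =>
          rw [List.append_nil] at hs
          exact absurd hs (IsMM_not_suffix pat t k hmm hk)
        | c' :: u' =>
          rw [List.cons_prefix_cons] at hu
          obtain ⟨rfl, hu'⟩ := hu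
          refine ⟨u', hu', ?_⟩
          rwa [show t ++ c' :: u' = t ++ [c'] ++ u' by simp] at hs

lemma kmpContains_iff (pat txt : List Int) (hpat : pat ≠ []) :
    (kmpContains pat txt = true) ↔ pat <:+: txt := by
  have hn : 0 < pat.length := List.length_pos_iff.mpr hpat
  unfold kmpContains
  rw [kmpGo_iff pat (kmpFail pat) (kmpFail_ok pat) txt [] 0 ?_ hn]
  · constructor
    · rintro ⟨u, hu, hs⟩
      rw [List.nil_append] at hs
      obtain ⟨s, rfl⟩ := hs
      obtain ⟨v, rfl⟩ := hu
      exact ⟨s, v, by simp⟩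
    · rintro ⟨s, v, rfl⟩
      refine ⟨s ++ pat, ⟨v, by simp⟩, by simp⟩
  · refine ⟨by omega, by simp, ?_⟩
    intro q hq hs
    rw [List.suffix_nil] at hs
    have hq0 : min q pat.length = 0 := by
      have := congrArg List.length hs
      simpa using this
    rcases Nat.min_eq_zero_iff.mp hq0 with h | h <;> omega

-- a list of the same length as p2 is an infix of p2 ++ p2 iff it is a rotation of p2
lemma infix_doubled_iff (p1 p2 : List Int) (hlen : p1.length = p2.length) (hn : 0 < p2.length) :
    (p1 <:+: (p2 ++ p2)) ↔ ∃ m < p2.length, p1 = p2.rotate m := by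
  constructor
  · rintro ⟨s, t, h⟩
    have hlens : s.length + (p1.length + t.length) = p2.length + p2.length := by
      have := congrArg List.length h
      simpa [List.length_append] using this
    have hm : s.length ≤ p2.length := by omega
    have hp1 : p1 = ((p2 ++ p2).drop s.length).take p1.length := by
      have hdrop : (p2 ++ p2).drop s.length = p1 ++ t := by
        rw [← h, List.append_assoc, List.drop_left]
      rw [hdrop, List.take_left]
    have hrot : p1 = p2.rotate s.length := by
      rw [hp1, List.drop_append_of_le_length hm, hlen]
      rw [List.take_append]
      have hdl : (p2.drop s.length).length = p2.length - s.length := by simp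
      rw [List.take_of_length_le (by omega), hdl,
        show p2.length - (p2.length - s.length) = s.length from by omega,
        List.rotate_eq_drop_append_take hm]
    rcases Nat.lt_or_ge s.length p2.length with hlt | hge
    · exact ⟨s.length, hlt, hrot⟩
    · refine ⟨0, hn, ?_⟩
      have : s.length = p2.length := by omega
      rw [hrot, this, List.rotate_length, List.rotate_zero]
  · rintro ⟨m, hm, rfl⟩
    rw [List.rotate_eq_drop_append_take (by omega)]
    refine ⟨p2.take m, p2.drop m, ?_⟩
    have h2 : p2.take m ++ p2.drop m = p2 := List.take_append_drop m p2
    calc p2.take m ++ (p2.drop m ++ p2.take m) ++ p2.drop m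
        = (p2.take m ++ p2.drop m) ++ (p2.take m ++ p2.drop m) := by
          simp only [List.append_assoc]
      _ = p2 ++ p2 := by rw [h2]

lemma kmpContains_rot (p p2 : List Int) (hlen : p.length = p2.length) (hn : 0 < p2.length) :
    (kmpContains p (p2 ++ p2) = true) ↔ ∃ m < p2.length, p = p2.rotate m := by
  rw [kmpContains_iff p (p2 ++ p2) (by intro h; subst h; simp at hlen; omega)]
  exact infix_doubled_iff p p2 hlen hn

-- ===== VERDICT (by name: the statement is the Claim_ definition above) =====
theorem faces_vertices_equal_spec : Claim_equal_faces_vertices_equal := by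
  intro p1 p2 _
  unfold Spec_faces_vertices_equal faces_vertices_equal faces_vertices_equal_alt
  simp only []
  by_cases hg : (p1.length : Int) ≠ (p2.length : Int) ∨ (p1.length : Int) = 0
  · rw [if_pos hg, if_pos (by tauto)]
  · rw [if_neg hg, if_neg (show ¬((p1.length : Int) = 0 ∨ (p1.length : Int) ≠ (p2.length : Int)) by tauto)]
    have hlen : p1.length = p2.length := by omega
    have hn : 0 < p2.length := by omega
    have hcast : (p1.length : Int) = (p2.length : Int) := by exact_mod_cast hlen
    rw [Bool.eq_iff_iff, Bool.or_eq_true, hcast,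
      kmpContains_rot p1 p2 hlen hn, kmpContains_rot p1.reverse p2 (by simp [hlen]) hn]
    constructor
    · intro h
      by_cases hF : fveLoopF p1 p2 (p2.length : Int) (PySem.List.pyRange 0 (p2.length : Int) 1) = true
      · left; rw [← loopF_iff p1 p2 hlen hn]; exact hF
      · rw [if_neg hF] at h
        by_cases hR : fveLoopR p1 p2 (p2.length : Int) (PySem.List.pyRange 0 (p2.length : Int) 1) = true
        · right; rw [← loopR_iff p1 p2 hlen hn]; exact hR
        · rw [if_neg hR] at h; exact absurd h (by simp)
    · intro h
      rcases h with h | h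
      · rw [if_pos (by rw [loopF_iff p1 p2 hlen hn]; exact h)]
      · by_cases hF : fveLoopF p1 p2 (p2.length : Int) (PySem.List.pyRange 0 (p2.length : Int) 1) = true
        · rw [if_pos hF]
        · rw [if_neg hF, if_pos (by rw [loopR_iff p1 p2 hlen hn]; exact h)]
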